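-- pv_equiv track=rewrite | github.com/hudora/myPLfrontend | mypl/utils.py | deduper
-- ===== SOURCE A (Python) =====
-- def deduper(positions):
--     """
--     >>> deduper([(4,"10195"), (0,"14695"), (24,"66702"), (180,"66702")])
--     [(4, '10195'), (204, '66702')]
--     """
--     sums = {}
--     for quantity, product in positions:
--         if quantity:
--             if product not in sums:
--                 sums[product] = 0
--             sums[product] += quantity
--     ret = [(quantity, product) for product, quantity in sums.items()]
--     ret.sort()
--     return ret
-- ===== SOURCE B (Python) =====
-- def deduper(positions):
--     nonzero = [(q, p) for q, p in positions if q]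
--     products = sorted(set(p for _, p in nonzero))
--     return sorted((sum(q for q, pp in nonzero if pp == prod), prod)
--                   for prod in products)
-- ===== Notes on version B (the rewrite author's own statement) =====
-- stated objective: alternative
-- what changed: Replaces A's single-pass dict accumulation with a sort-based pipeline: filter out zero-quantity positions, sort the distinct products, and compute each product's total by summing its quantities directly, with no dict.
import Mathlib
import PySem

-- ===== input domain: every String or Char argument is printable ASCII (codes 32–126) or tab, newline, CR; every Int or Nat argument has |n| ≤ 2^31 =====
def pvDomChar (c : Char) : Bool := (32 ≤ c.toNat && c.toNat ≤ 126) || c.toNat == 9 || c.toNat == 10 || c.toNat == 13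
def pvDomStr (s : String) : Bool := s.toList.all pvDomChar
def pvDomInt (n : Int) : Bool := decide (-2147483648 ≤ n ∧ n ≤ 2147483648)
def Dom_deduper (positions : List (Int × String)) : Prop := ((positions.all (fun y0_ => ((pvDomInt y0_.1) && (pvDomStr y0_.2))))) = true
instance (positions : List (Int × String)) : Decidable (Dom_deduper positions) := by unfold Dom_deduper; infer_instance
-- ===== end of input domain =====

-- B replaces A's dict accumulation by filter-nonzero + sorted distinct products + per-product sums (alternative, sort-based shape).


-- ===== PORT A =====
-- helper: the body of A's 'for quantity, product in positions' loop
def dedStep (sums : PySem.Dict String Int) (qp : Int × String) : PySem.Dict String Int :=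
  if qp.1 ≠ 0 then
    let sums := if ¬ sums.contains qp.2 then sums.insert qp.2 0 else sums
    sums.insert qp.2 (sums.getD qp.2 0 + qp.1)
  else sums

def deduper (positions : List (Int × String)) : List (Int × String) :=
  let sums : PySem.Dict String Int := positions.foldl dedStep PySem.Dict.empty
  let ret := sums.items.map (fun pq => (pq.2, pq.1))
  PySem.List.sorted2 ret (·.1) (·.2) false

-- ===== PORT B =====
def deduper_alt (positions : List (Int × String)) : List (Int × String) :=
  let nonzero := positions.filter (fun qp => qp.1 ≠ 0)
  let products := PySem.List.sorted (PySem.Set.ofList (nonzero.map (·.2))) (fun p => p) false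
  PySem.List.sorted2
    (products.map (fun prod =>
      (((nonzero.filter (fun qp => qp.2 == prod)).map (·.1)).sum, prod)))
    (·.1) (·.2) false

-- ===== PRECONDITION & SPEC =====
def Spec_deduper (positions : List (Int × String)) (out : List (Int × String)) : Prop := out = deduper_alt positions
instance (positions : List (Int × String)) (out : List (Int × String)) : Decidable (Spec_deduper positions out) := by unfold Spec_deduper; infer_instance

-- ===== CLAIM (what is proved, stated in full; the proofs are below) =====
def Claim_equal_deduper : Prop := ∀ (positions : List (Int × String)), Dom_deduper positions → Spec_deduper positions (deduper positions)

-- ===== LEMMAS AND PROOFS =====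

-- the per-product total of nonzero quantities (B's inner sum)
def dedTot (positions : List (Int × String)) (p : String) : Int :=
  (((positions.filter (fun qp => qp.1 ≠ 0)).filter (fun qp => qp.2 == p)).map (·.1)).sum

theorem dedStep_getD (d : PySem.Dict String Int) (q : Int) (p p' : String) :
    (dedStep d (q, p)).getD p' 0 = d.getD p' 0 + (if q ≠ 0 ∧ p' = p then q else 0) := by
  by_cases hq : q ≠ 0
  · by_cases hc : d.contains p
    · by_cases hp : p' = p <;> simp [dedStep, hq, hc, hp, PySem.Dict.getD_insert]
    · by_cases hp : p' = p <;>
        simp [dedStep, hq, hc, hp, PySem.Dict.getD_insert,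
          PySem.Dict.getD_of_not_contains d _ (by simpa using hc)]
  · simp [dedStep, hq]

theorem dedStep_keys (d : PySem.Dict String Int) (q : Int) (p : String) :
    (dedStep d (q, p)).keys = if q ≠ 0 then PySem.Set.add d.keys p else d.keys := by
  by_cases hq : q ≠ 0
  · simp only [dedStep, hq, if_true, ne_eq, not_false_iff]
    by_cases hc : d.contains p
    · rw [if_neg (by simp [hc])]
      rw [PySem.Dict.keys_insert_of_contains d _ hc, PySem.Set.add]
      have hm : p ∈ d.keys := (PySem.Dict.contains_iff_mem_keys d p).1 hc
      simp [PySem.Set.contains, hm]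
    · rw [if_pos (by simp [hc])]
      rw [PySem.Dict.keys_insert_of_contains _ _ (PySem.Dict.contains_insert_self d p 0),
        PySem.Dict.keys_insert_of_not_contains d _ (by simpa using hc), PySem.Set.add]
      have hm : p ∉ d.keys := fun h => hc ((PySem.Dict.contains_iff_mem_keys d p).2 h)
      simp [PySem.Set.contains, hm]
  · simp [dedStep, hq]

theorem fold_getD (positions : List (Int × String)) (d : PySem.Dict String Int) (p : String) :
    (positions.foldl dedStep d).getD p 0 = d.getD p 0 + dedTot positions p := by
  induction positions generalizing d with
  | nil => simp [dedTot]
  | cons x t ih =>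
    obtain ⟨q, pr⟩ := x
    rw [List.foldl_cons, ih, dedStep_getD]
    unfold dedTot
    by_cases hq : q ≠ 0
    · by_cases hp : p = pr
      · simp [hq, hp]; ring
      · have hp' : ¬ (pr == p) = true := by simp; exact fun h => hp h.symm
        simp [hq, hp, hp']
    · simp [hq]

theorem fold_keys (positions : List (Int × String)) (d : PySem.Dict String Int) :
    (positions.foldl dedStep d).keys =
      PySem.Set.update d.keys ((positions.filter (fun qp => qp.1 ≠ 0)).map (·.2)) := by
  induction positions generalizing d with
  | nil => simp [PySem.Set.update]
  | cons x t ih =>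
    obtain ⟨q, pr⟩ := x
    rw [List.foldl_cons, ih, dedStep_keys]
    by_cases hq : q ≠ 0 <;> simp [hq, PySem.Set.update]

theorem sorted2_eq_sorted_lex (xs : List (Int × String)) :
    PySem.List.sorted2 xs (·.1) (·.2) false =
      PySem.List.sorted xs (fun x => toLex x) false := by
  have hbef : (fun a b : Int × String =>
        decide (a.1 < b.1) || (!decide (b.1 < a.1) && decide (a.2 < b.2)))
      = (fun a b : Int × String => decide (toLex a < toLex b)) := by
    funext a b
    by_cases h1 : a.1 < b.1 <;> by_cases h2 : b.1 < a.1 <;> by_cases h3 : a.2 < b.2 <;>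
      simp [h1, h2, h3, Prod.Lex.lt_iff] <;> omega
  simp only [PySem.List.sorted2, PySem.List.sorted, Bool.false_eq_true, if_false]
  rw [hbef]

theorem sorted2_eq_of_perm (xs ys : List (Int × String))
    (hperm : xs.Perm ys) (hinj : (xs.map (fun x => toLex x)).Nodup) :
    PySem.List.sorted2 xs (·.1) (·.2) false = PySem.List.sorted2 ys (·.1) (·.2) false := by
  rw [sorted2_eq_sorted_lex, sorted2_eq_sorted_lex]
  have hzperm : (PySem.List.sorted xs (fun x => toLex x) false).Perm xs :=
    PySem.List.sorted_perm xs (fun x => toLex x) false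
  have hle : (PySem.List.sorted xs (fun x => toLex x) false).Pairwise
      (fun a b => toLex a ≤ toLex b) := PySem.List.sorted_pairwise xs (fun x => toLex x)
  have hnd : ((PySem.List.sorted xs (fun x => toLex x) false).map (fun x => toLex x)).Nodup :=
    (hzperm.map (fun x => toLex x)).nodup_iff.mpr hinj
  have hne : (PySem.List.sorted xs (fun x => toLex x) false).Pairwise
      (fun a b => toLex a ≠ toLex b) := List.pairwise_map.mp hnd
  have hlt : (PySem.List.sorted xs (fun x => toLex x) false).Pairwise
      (fun a b => toLex a < toLex b) :=
    (hle.and hne).imp (fun h => lt_of_le_of_ne h.1 h.2)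
  exact (PySem.List.sorted_eq_of_perm_of_pairwise_lt ys
    (PySem.List.sorted xs (fun x => toLex x) false) (fun x => toLex x)
    (hzperm.trans hperm) hlt).symm

theorem deduper_spec' (positions : List (Int × String)) :
    deduper positions = deduper_alt positions := by
  show PySem.List.sorted2
      ((positions.foldl dedStep PySem.Dict.empty).items.map (fun pq => (pq.2, pq.1))) (·.1) (·.2) false
    = PySem.List.sorted2
      (((PySem.List.sorted (PySem.Set.ofList ((positions.filter (fun qp => qp.1 ≠ 0)).map (·.2))) (fun p => p) false)).map
        (fun prod => ((((positions.filter (fun qp => qp.1 ≠ 0)).filter (fun qp => qp.2 == prod)).map (·.1)).sum, prod)))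
      (·.1) (·.2) false
  have hkeys : (positions.foldl dedStep PySem.Dict.empty).keys =
      PySem.Set.ofList ((positions.filter (fun qp => qp.1 ≠ 0)).map (·.2)) := by
    rw [fold_keys]
    simp [PySem.Set.update, PySem.Set.ofList_eq_foldl]
  have hnd : (positions.foldl dedStep PySem.Dict.empty).keys.Nodup := by
    rw [hkeys]; exact PySem.Set.nodup_ofList _
  rw [PySem.Dict.items_eq_map_keys _ hnd 0, hkeys]
  simp only [List.map_map]
  have hmapeq : (PySem.Set.ofList ((positions.filter (fun qp => qp.1 ≠ 0)).map (·.2))).map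
        ((fun pq : String × Int => (pq.2, pq.1)) ∘ fun k => (k, (positions.foldl dedStep PySem.Dict.empty).getD k 0))
      = (PySem.Set.ofList ((positions.filter (fun qp => qp.1 ≠ 0)).map (·.2))).map
        (fun prod => ((((positions.filter (fun qp => qp.1 ≠ 0)).filter (fun qp => qp.2 == prod)).map (·.1)).sum, prod)) := by
    apply List.map_congr_left
    intro k _
    have := fold_getD positions PySem.Dict.empty k
    simp [dedTot] at this
    simp [Function.comp, this]
  rw [hmapeq]
  apply sorted2_eq_of_perm
  · exact (List.Perm.map _ (PySem.List.sorted_perm _ (fun p => p) false)).symm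
  · rw [List.map_map]
    apply List.Nodup.map
    · intro a b h
      have := congrArg (fun x => (ofLex x).2) h
      simpa using this
    · exact PySem.Set.nodup_ofList _

-- ===== VERDICT (by name: the statement is the Claim_ definition above) =====
theorem deduper_spec : Claim_equal_deduper := by
  intro positions _
  unfold Spec_deduper
  exact deduper_spec' positions
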